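-- pv_equiv track=rewrite | github.com/CapedHero/python-epi-judge | epi_judge_python/primitive_divide.py | fit_squares_of_divisor
-- ===== SOURCE A (Python) =====
-- from typing import Tuple
--
-- def fit_squares_of_divisor(dividend: int, divisor: int) -> Tuple[int, int]:
--     quotient: int = 1
--     divisor_squares: int = divisor
--     divisor_square_lookahead: int = divisor_squares << 1
--
--     while dividend >= divisor_square_lookahead:
--         quotient <<= 1
--         divisor_squares = divisor_square_lookahead
--         divisor_square_lookahead <<= 1
--
--     remaining_dividend: int = dividend - divisor_squares
--     return remaining_dividend, quotient
-- ===== SOURCE B (Python) =====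
-- def fit_squares_of_divisor(dividend: int, divisor: int):
--     ratio = dividend // divisor
--     quotient = 1 if ratio < 1 else 1 << (ratio.bit_length() - 1)
--     return dividend - quotient * divisor, quotient
-- ===== Notes on version B (the rewrite author's own statement) =====
-- stated objective: alternative
-- what changed: Replaces A's quotient-doubling while-loop with a closed-form quotient: ratio = dividend // divisor, quotient = 1 if ratio < 1 else 1 << (ratio.bit_length() - 1).
-- outside the precondition, e.g. on fit_squares_of_divisor(-7, -3): A returns (-4, 1), B returns (-1, 2); on fit_squares_of_divisor(5, 0): A does not finish within the time limit, B raises ZeroDivisionError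
import Mathlib
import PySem

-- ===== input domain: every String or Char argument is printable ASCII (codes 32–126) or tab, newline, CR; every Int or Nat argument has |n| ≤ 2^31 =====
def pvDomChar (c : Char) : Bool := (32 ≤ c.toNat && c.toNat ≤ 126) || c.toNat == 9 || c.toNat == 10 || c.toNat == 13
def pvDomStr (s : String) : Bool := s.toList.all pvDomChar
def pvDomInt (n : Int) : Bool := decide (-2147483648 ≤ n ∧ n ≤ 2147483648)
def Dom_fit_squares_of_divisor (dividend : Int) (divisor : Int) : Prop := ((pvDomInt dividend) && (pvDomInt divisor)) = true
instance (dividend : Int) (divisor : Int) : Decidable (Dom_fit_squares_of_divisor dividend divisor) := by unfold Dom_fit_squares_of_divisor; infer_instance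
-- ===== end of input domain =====

-- B replaces A's quotient-doubling loop with a closed form from ratio.bit_length() (alternative algorithm, O(1) big-int ops vs O(log(dividend/divisor)) loop iterations).


-- ===== PORT A =====
-- the while loop; 'x << 1' is ported as 'x * 2' (exact on Int).  The '1 ≤ look'
-- conjunct is a totality guard only: when it fails while 'look ≤ dividend' holds the
-- Python loop runs forever (divisor ≤ 0), and inside Pre_ (divisor ≥ 1) 'look' is
-- always ≥ 2, so the guard never changes the computation there.
def pvLoopA (dividend quotient squares look : Int) : Int × Int :=
  if h : look ≤ dividend ∧ 1 ≤ look then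
    pvLoopA dividend (quotient * 2) look (look * 2)
  else
    (dividend - squares, quotient)
termination_by (dividend + 1 - look).toNat
decreasing_by omega

def fit_squares_of_divisor (dividend : Int) (divisor : Int) : Int × Int :=
  pvLoopA dividend 1 divisor (divisor * 2)

-- ===== PORT B =====
-- ratio = dividend // divisor; quotient = 1 if ratio < 1 else 1 << (ratio.bit_length() - 1)
def fit_squares_of_divisor_alt (dividend : Int) (divisor : Int) : Int × Int :=
  let ratio := PySem.Int.floordiv dividend divisor
  let quotient : Int :=
    if ratio < 1 then 1 else (1 : Int) <<< (PySem.Int.bitLength ratio - 1)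
  (dividend - quotient * divisor, quotient)

-- ===== PRECONDITION & SPEC =====
-- Pre_ excludes non-positive divisors: there A's doubling loop runs forever whenever
-- dividend ≥ 2*divisor, and when it does return (dividend < 2*divisor) the value is an
-- accident of the loop never firing on an input outside the routine's divide domain,
-- while B's floor division raises ZeroDivisionError at divisor = 0 and gives the
-- mathematically consistent quotient for divisor < 0.
def Pre_fit_squares_of_divisor (dividend : Int) (divisor : Int) : Prop := 1 ≤ divisor
instance (dividend : Int) (divisor : Int) : Decidable (Pre_fit_squares_of_divisor dividend divisor) := by unfold Pre_fit_squares_of_divisor; infer_instance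
def pvWitness_fit_squares_of_divisor : Int × Int := (11, 2)

def Spec_fit_squares_of_divisor (dividend : Int) (divisor : Int) (out : Int × Int) : Prop := out = fit_squares_of_divisor_alt dividend divisor
instance (dividend : Int) (divisor : Int) (out : Int × Int) : Decidable (Spec_fit_squares_of_divisor dividend divisor out) := by unfold Spec_fit_squares_of_divisor; infer_instance

-- ===== CLAIM (what is proved, stated in full; the proofs are below) =====
def Claim_equal_fit_squares_of_divisor : Prop := ∀ (dividend : Int) (divisor : Int), Dom_fit_squares_of_divisor dividend divisor → Pre_fit_squares_of_divisor dividend divisor → Spec_fit_squares_of_divisor dividend divisor (fit_squares_of_divisor dividend divisor)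

-- ===== LEMMAS AND PROOFS =====

-- B's quotient as a function of dividend and the current divisor (proof-side helper).
def pvAltQ (d s : Int) : Int :=
  if PySem.Int.floordiv d s < 1 then 1
  else (1 : Int) <<< (PySem.Int.bitLength (PySem.Int.floordiv d s) - 1)

lemma pvAltQ_small {d s : Int} (hs : 0 < s) (h : d < s * 2) : pvAltQ d s = 1 := by
  unfold pvAltQ
  split
  · rfl
  · rename_i hge
    have h2 : PySem.Int.floordiv d s < 2 := by
      rw [PySem.Int.floordiv_lt_iff_lt_mul hs]; linarith
    have : PySem.Int.floordiv d s = 1 := by omega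
    rw [this]; decide

lemma pvBitLength_pos {r : Int} (hr : 0 < r) : 1 ≤ PySem.Int.bitLength r := by
  rw [PySem.Int.bitLength_of_pos hr]; omega

lemma pvAltQ_step {d s : Int} (hs : 0 < s) (h : s * 2 ≤ d) :
    pvAltQ d s = 2 * pvAltQ d (s * 2) := by
  have hr2 : 2 ≤ PySem.Int.floordiv d s := by
    rw [PySem.Int.le_floordiv_iff_mul_le hs]; linarith
  have hhalf : PySem.Int.floordiv d (s * 2) = PySem.Int.floordiv (PySem.Int.floordiv d s) 2 := by
    rw [PySem.Int.floordiv_eq_ediv_of_pos (by omega), PySem.Int.floordiv_eq_ediv_of_pos hs,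
      PySem.Int.floordiv_eq_ediv_of_pos (by norm_num), Int.ediv_ediv_of_nonneg (le_of_lt hs)]
  have hr' : 1 ≤ PySem.Int.floordiv d (s * 2) := by
    rw [PySem.Int.le_floordiv_iff_mul_le (by omega)]; linarith
  have hbl : PySem.Int.bitLength (PySem.Int.floordiv d s)
      = PySem.Int.bitLength (PySem.Int.floordiv d (s * 2)) + 1 := by
    rw [PySem.Int.bitLength_of_pos (by omega : (0:Int) < PySem.Int.floordiv d s), hhalf]
  have hbl1 := pvBitLength_pos (by omega : (0:Int) < PySem.Int.floordiv d (s * 2))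
  unfold pvAltQ
  rw [if_neg (by omega), if_neg (by omega), hbl]
  simp only [Int.shiftLeft_eq, one_mul]
  rw [show PySem.Int.bitLength (PySem.Int.floordiv d (s*2)) + 1 - 1
      = (PySem.Int.bitLength (PySem.Int.floordiv d (s*2)) - 1) + 1 by omega]
  ring

lemma pvLoop_eq (n : Nat) : ∀ (d s q : Int), 0 < s →
    (PySem.Int.floordiv d s).toNat ≤ n →
    pvLoopA d q s (s * 2) = (d - pvAltQ d s * s, q * pvAltQ d s) := by
  induction n with
  | zero =>
    intro d s q hs hn
    have hlt : d < s * 2 := by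
      by_contra hge
      have : 2 ≤ PySem.Int.floordiv d s := by
        rw [PySem.Int.le_floordiv_iff_mul_le hs]; omega
      omega
    rw [pvLoopA, dif_neg (by omega), pvAltQ_small hs hlt]
    simp
  | succ m ih =>
    intro d s q hs hn
    by_cases hge : s * 2 ≤ d
    · have hr2 : 2 ≤ PySem.Int.floordiv d s := by
        rw [PySem.Int.le_floordiv_iff_mul_le hs]; linarith
      have hr' : 1 ≤ PySem.Int.floordiv d (s * 2) := by
        rw [PySem.Int.le_floordiv_iff_mul_le (by omega)]; linarith
      have hdec : PySem.Int.floordiv d (s * 2) < PySem.Int.floordiv d s := by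
        rw [PySem.Int.floordiv_lt_iff_lt_mul (by omega)]
        calc d = PySem.Int.floordiv d s * s + PySem.Int.mod d s := (PySem.Int.floordiv_mul_add_mod d s).symm
          _ < PySem.Int.floordiv d s * s + s := by have := PySem.Int.mod_lt d hs; omega
          _ ≤ PySem.Int.floordiv d s * (s * 2) := by nlinarith
      rw [pvLoopA, dif_pos ⟨hge, by omega⟩,
        ih d (s * 2) (q * 2) (by omega) (by omega),
        pvAltQ_step hs hge]
      exact Prod.ext (by ring) (by ring)
    · rw [pvLoopA, dif_neg (by omega), pvAltQ_small hs (by omega)]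
      simp

-- ===== VERDICT (by name: the statement is the Claim_ definition above) =====
theorem fit_squares_of_divisor_spec : Claim_equal_fit_squares_of_divisor := by
  intro d v _ hpre
  unfold Spec_fit_squares_of_divisor fit_squares_of_divisor fit_squares_of_divisor_alt
  rw [pvLoop_eq (PySem.Int.floordiv d v).toNat d v 1 (by exact hpre) (le_refl _)]
  simp only [one_mul, pvAltQ]
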